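-- pv_equiv track=rewrite | github.com/OSInside/kiwi | kiwi/path.py | sort_by_hierarchy
-- ===== SOURCE A (Python) =====
-- import collections
--
-- def sort_by_hierarchy(path_list):
--     """
--     Sort given list of path names by their hierachy in the tree
--
--     Example:
--
--     .. code:: python
--
--         result = Path.sort_by_hierarchy(['/var/lib', '/var'])
--
--     :param list path_list: list of path names
--
--     :return: hierachy sorted path_list
--
--     :rtype: list
--     """
--     paths_at_depth = {}
--     for path in path_list:
--         path_elements = path.split('/')
--         path_depth = len(path_elements)
--         if path_depth not in paths_at_depth:
--             paths_at_depth[path_depth] = []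
--         paths_at_depth[path_depth].append(path)
--     ordered_paths_at_depth = collections.OrderedDict(
--         sorted(paths_at_depth.items())
--     )
--     ordered_paths = []
--     for path_depth in ordered_paths_at_depth:
--         for path in ordered_paths_at_depth[path_depth]:
--             ordered_paths.append(path)
--     return ordered_paths
-- ===== SOURCE B (Python) =====
-- def sort_by_hierarchy(path_list):
--     return sorted(path_list, key=lambda p: len(p.split('/')))
-- ===== Notes on version B (the rewrite author's own statement) =====
-- stated objective: simpler
-- what changed: Replaces the bucket-by-depth dict machinery (group into a dict keyed by depth, sort the keys, concatenate the buckets) with a single stable sort keyed by len(p.split('/')); Python's stable sort preserves per-depth insertion order exactly as the buckets did.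
import Mathlib
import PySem

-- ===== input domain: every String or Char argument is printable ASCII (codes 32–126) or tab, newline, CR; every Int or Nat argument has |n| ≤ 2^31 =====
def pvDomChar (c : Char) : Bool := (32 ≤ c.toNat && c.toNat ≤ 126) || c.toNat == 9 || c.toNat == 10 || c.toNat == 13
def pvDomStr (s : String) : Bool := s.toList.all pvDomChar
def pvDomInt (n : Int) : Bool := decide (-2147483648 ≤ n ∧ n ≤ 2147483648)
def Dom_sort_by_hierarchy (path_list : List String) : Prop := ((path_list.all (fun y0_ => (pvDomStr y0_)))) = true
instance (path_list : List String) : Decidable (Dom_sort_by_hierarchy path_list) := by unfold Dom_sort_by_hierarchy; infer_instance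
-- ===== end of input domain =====

-- B replaces A's bucket-by-depth dict machinery with one stable sort keyed by the path depth (simpler; same result).

-- ===== PORT A =====
-- A's loop body: 'if depth not in d: d[depth] = []' then 'd[depth].append(path)'
def pvStepA (d : PySem.Dict Int (List String)) (path : String) : PySem.Dict Int (List String) :=
  let path_elements := (PySem.Str.split? path "/").getD []
  let path_depth : Int := path_elements.length
  let d := if d.contains path_depth then d else d.insert path_depth []
  d.modify path_depth [] (fun l => l ++ [path])

def sort_by_hierarchy (path_list : List String) : List String :=
  let paths_at_depth : PySem.Dict Int (List String) := path_list.foldl pvStepA PySem.Dict.empty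
  -- sorted(paths_at_depth.items()): the int keys are distinct, so Python's tuple order here is the order of the first components
  let ordered_paths_at_depth := PySem.List.sorted paths_at_depth.items (fun kv => kv.1) false
  ordered_paths_at_depth.foldl (fun acc kv => kv.2.foldl (fun acc path => acc ++ [path]) acc) []

-- ===== PORT B =====
def sort_by_hierarchy_alt (path_list : List String) : List String :=
  PySem.List.sorted path_list (fun p => (((PySem.Str.split? p "/").getD []).length : Int)) false

-- ===== PRECONDITION & SPEC =====
def Spec_sort_by_hierarchy (path_list : List String) (out : List String) : Prop := out = sort_by_hierarchy_alt path_list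
instance (path_list : List String) (out : List String) : Decidable (Spec_sort_by_hierarchy path_list out) := by unfold Spec_sort_by_hierarchy; infer_instance

-- ===== CLAIM (what is proved, stated in full; the proofs are below) =====
def Claim_equal_sort_by_hierarchy : Prop := ∀ (path_list : List String), Dom_sort_by_hierarchy path_list → Spec_sort_by_hierarchy path_list (sort_by_hierarchy path_list)

-- ===== LEMMAS AND PROOFS =====

-- the common key: path depth = len(path.split('/'))
def pvkey (p : String) : Int := ((PySem.Str.split? p "/").getD []).length

-- the bucket of depth k, in input order
def pvbl (l : List String) (k : Int) : List String := l.filter (fun p => pvkey p == k)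

-- canonical form both programs compute: buckets concatenated in increasing depth order
def pvbuckets (l : List String) : List String :=
  (PySem.List.sorted (PySem.Set.ofList (l.map pvkey)) (fun k => k) false).flatMap (pvbl l)

theorem pv_flatMap_congr {α β : Type} (l : List α) (f g : α → List β)
    (h : ∀ a ∈ l, f a = g a) : l.flatMap f = l.flatMap g := by
  induction l with
  | nil => rfl
  | cons a l ih =>
    rw [List.flatMap_cons, List.flatMap_cons, h a (List.mem_cons_self ..),
      ih (fun a' ha' => h a' (List.mem_cons_of_mem _ ha'))]

theorem pv_insertBy_append {α : Type} (bf : α → α → Bool) (x : α) (as bs : List α)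
    (h : ∀ a ∈ as, bf x a = false) :
    PySem.List.insertBy bf x (as ++ bs) = as ++ PySem.List.insertBy bf x bs := by
  induction as with
  | nil => simp
  | cons a as ih =>
    have ha : bf x a = false := h a (List.mem_cons_self ..)
    simp only [List.cons_append, PySem.List.insertBy, ha]
    simp only [Bool.false_eq_true, if_false]
    exact congrArg (a :: ·) (ih (fun a' ha' => h a' (List.mem_cons_of_mem _ ha')))

theorem pv_insertBy_cons {α : Type} (bf : α → α → Bool) (x : α) (bs : List α)
    (h : ∀ a ∈ bs, bf x a = true) :
    PySem.List.insertBy bf x bs = x :: bs := by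
  cases bs with
  | nil => rfl
  | cons b bs => simp [PySem.List.insertBy, h b (List.mem_cons_self ..)]

theorem pv_stepA_getD (d : PySem.Dict Int (List String)) (p : String) (c : Int) :
    (pvStepA d p).getD c [] = if c = pvkey p then d.getD (pvkey p) [] ++ [p] else d.getD c [] := by
  simp only [pvStepA, pvkey]
  by_cases hc : d.contains ((((PySem.Str.split? p "/").getD []).length : Int)) = true
  · rw [if_pos hc, PySem.Dict.getD_modify]
  · have hc' : d.contains ((((PySem.Str.split? p "/").getD []).length : Int)) = false := by
      simpa using hc
    rw [if_neg (by simp [hc']), PySem.Dict.getD_modify]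
    by_cases h : c = (((PySem.Str.split? p "/").getD []).length : Int)
    · rw [if_pos h, if_pos h, PySem.Dict.getD_insert, if_pos rfl,
        PySem.Dict.getD_of_not_contains d _ hc', List.nil_append]
    · rw [if_neg h, if_neg h, PySem.Dict.getD_insert, if_neg h]

theorem pv_stepA_keys (d : PySem.Dict Int (List String)) (p : String) :
    (pvStepA d p).keys = PySem.Set.add d.keys (pvkey p) := by
  simp only [pvStepA, pvkey]
  by_cases hc : d.contains ((((PySem.Str.split? p "/").getD []).length : Int)) = true
  · rw [if_pos hc, PySem.Dict.keys_modify, PySem.Dict.keys_insert_of_contains _ _ hc]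
    rw [PySem.Set.add_of_mem]
    exact (PySem.Dict.contains_iff_mem_keys d _).mp hc
  · have hc' : d.contains ((((PySem.Str.split? p "/").getD []).length : Int)) = false := by
      simpa using hc
    rw [if_neg (by simp [hc']), PySem.Dict.keys_modify]
    rw [PySem.Dict.keys_insert_of_contains _ _ (by simp [PySem.Dict.contains_insert_self])]
    rw [PySem.Dict.keys_insert_of_not_contains _ _ hc']
    rw [PySem.Set.add_of_not_mem]
    intro hmem
    exact absurd ((PySem.Dict.contains_iff_mem_keys d _).mpr hmem) (by simp [hc'])

theorem pv_foldl_getD (l : List String) (d : PySem.Dict Int (List String)) (c : Int) :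
    (l.foldl pvStepA d).getD c [] = d.getD c [] ++ pvbl l c := by
  induction l generalizing d with
  | nil => simp [pvbl]
  | cons x l ih =>
    rw [List.foldl_cons, ih, pv_stepA_getD]
    unfold pvbl
    rw [List.filter_cons]
    by_cases h : c = pvkey x
    · subst h
      rw [if_pos rfl, if_pos (beq_self_eq_true _), List.append_assoc, List.singleton_append]
    · have hx : (pvkey x == c) = false := beq_eq_false_iff_ne.mpr (fun e => h e.symm)
      rw [if_neg h, hx, if_neg (fun e => Bool.false_ne_true e)]

theorem pv_foldl_keys (l : List String) (d : PySem.Dict Int (List String)) :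
    (l.foldl pvStepA d).keys = PySem.Set.update d.keys (l.map pvkey) := by
  induction l generalizing d with
  | nil => simp [PySem.Set.update]
  | cons x l ih =>
    rw [List.foldl_cons, ih, List.map_cons, PySem.Set.update_cons, pv_stepA_keys]

theorem pv_foldl_inner (v : List String) (acc : List String) :
    v.foldl (fun acc path => acc ++ [path]) acc = acc ++ v := by
  induction v generalizing acc with
  | nil => simp
  | cons p v ih => rw [List.foldl_cons, ih, List.append_assoc, List.singleton_append]

theorem pv_foldl_outer (ys : List (Int × List String)) (acc : List String) :
    ys.foldl (fun acc kv => kv.2.foldl (fun acc path => acc ++ [path]) acc) acc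
      = acc ++ ys.flatMap (fun kv => kv.2) := by
  induction ys generalizing acc with
  | nil => simp
  | cons kv ys ih =>
    rw [List.foldl_cons, pv_foldl_inner, ih, List.flatMap_cons, List.append_assoc]

-- A computes the canonical bucket concatenation
theorem pv_A_eq_buckets (l : List String) : sort_by_hierarchy l = pvbuckets l := by
  simp only [sort_by_hierarchy]
  set D := l.foldl pvStepA PySem.Dict.empty with hD
  have hnd : D.keys.Nodup := by
    rw [hD, pv_foldl_keys]
    exact PySem.Set.nodup_update _ _ (by simp [PySem.Dict.keys_empty])
  have hkeys : D.keys = PySem.Set.ofList (l.map pvkey) := by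
    rw [hD, pv_foldl_keys, PySem.Dict.keys_empty, PySem.Set.update_nil_left]
  have hitems : D.items = D.keys.map (fun k => (k, D.getD k [])) :=
    PySem.Dict.items_eq_map_keys D hnd []
  have hsorted : PySem.List.sorted D.items (fun kv => kv.1) false
      = (PySem.List.sorted D.keys (fun k => k) false).map (fun k => (k, D.getD k [])) := by
    apply PySem.List.sorted_eq_of_perm_of_pairwise_lt
    · rw [hitems]
      exact (PySem.List.sorted_perm D.keys (fun k => k) false).map _
    · rw [List.pairwise_map]
      rw [hkeys]
      exact PySem.List.sorted_ofList_pairwise_lt _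
  have hgetD : ∀ k, D.getD k [] = pvbl l k := by
    intro k
    rw [hD, pv_foldl_getD]
    simp [PySem.Dict.getD_empty]
  rw [hsorted, pv_foldl_outer, List.nil_append, List.flatMap_map]
  unfold pvbuckets
  rw [hkeys]
  exact pv_flatMap_congr _ _ _ (fun k _ => hgetD k)

-- one stable-insertion step extends the bucket concatenation at the right bucket
theorem pv_insert_buckets (l : List String) (x : String) :
    PySem.List.insertBy (fun a b => decide (pvkey a < pvkey b)) x (pvbuckets l)
      = pvbuckets (l ++ [x]) := by
  have hmem : pvkey x ∈ PySem.List.sorted (PySem.Set.ofList ((l ++ [x]).map pvkey)) (fun k => k) false := by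
    rw [PySem.List.mem_sorted, PySem.Set.mem_ofList]
    exact List.mem_map_of_mem (List.mem_append_right _ (List.mem_singleton_self _))
  obtain ⟨A₁, A₂, hsplit⟩ := List.append_of_mem hmem
  have hpw : (A₁ ++ pvkey x :: A₂).Pairwise (· < ·) := by
    rw [← hsplit]; exact PySem.List.sorted_ofList_pairwise_lt _
  obtain ⟨pw1, hpw2, hcross⟩ := List.pairwise_append.mp hpw
  have h2 : ∀ b ∈ A₂, pvkey x < b := (List.pairwise_cons.mp hpw2).1
  have pw2 : A₂.Pairwise (· < ·) := (List.pairwise_cons.mp hpw2).2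
  have h1 : ∀ a ∈ A₁, a < pvkey x := fun a ha => hcross a ha _ (List.mem_cons_self ..)
  -- buckets of l ++ [x]
  have hbl' : ∀ k, pvbl (l ++ [x]) k = pvbl l k ++ (if pvkey x == k then [x] else []) := by
    intro k
    simp [pvbl, List.filter_append, List.filter_cons]
  have hA1 : A₁.flatMap (pvbl (l ++ [x])) = A₁.flatMap (pvbl l) := by
    apply pv_flatMap_congr
    intro k hk
    rw [hbl', if_neg (by simp; exact fun h => absurd (h ▸ h1 k hk) (lt_irrefl _)), List.append_nil]
  have hA2 : A₂.flatMap (pvbl (l ++ [x])) = A₂.flatMap (pvbl l) := by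
    apply pv_flatMap_congr
    intro k hk
    rw [hbl', if_neg (by simp; exact fun h => absurd (h ▸ h2 k hk) (lt_irrefl _)), List.append_nil]
  have hbk0 : pvbl (l ++ [x]) (pvkey x) = pvbl l (pvkey x) ++ [x] := by
    rw [hbl', if_pos (by simp)]
  -- pvbuckets l in split form
  have hmemb : ∀ k, ∀ p ∈ pvbl l k, pvkey p = k := by
    intro k p hp
    have := List.of_mem_filter hp
    simpa using this
  have hSold : pvbuckets l = A₁.flatMap (pvbl l) ++ (pvbl l (pvkey x) ++ A₂.flatMap (pvbl l)) := by
    by_cases hk : pvkey x ∈ l.map pvkey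
    · have hset : PySem.Set.ofList ((l ++ [x]).map pvkey) = PySem.Set.ofList (l.map pvkey) := by
        rw [List.map_append, List.map_singleton, PySem.Set.ofList_append_singleton,
          PySem.Set.add_of_mem (by rw [PySem.Set.mem_ofList]; exact hk)]
      unfold pvbuckets
      rw [← hset, hsplit, List.flatMap_append, List.flatMap_cons]
    · have hset : PySem.Set.ofList ((l ++ [x]).map pvkey)
          = (PySem.Set.ofList (l.map pvkey) : List Int) ++ [pvkey x] := by
        rw [List.map_append, List.map_singleton, PySem.Set.ofList_append_singleton,
          PySem.Set.add_of_not_mem (by rw [PySem.Set.mem_ofList]; exact hk)]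
      have hperm : (A₁ ++ A₂).Perm (PySem.Set.ofList (l.map pvkey)) := by
        have p1 : (A₁ ++ pvkey x :: A₂).Perm ((PySem.Set.ofList (l.map pvkey) : List Int) ++ [pvkey x]) := by
          rw [← hsplit, ← hset]
          exact PySem.List.sorted_perm _ _ _
        have p2 : (A₁ ++ pvkey x :: A₂).Perm (pvkey x :: (A₁ ++ A₂)) := List.perm_middle
        have p3 := List.perm_append_singleton (pvkey x) (PySem.Set.ofList (l.map pvkey) : List Int)
        exact (p2.symm.trans (p1.trans p3)).cons_inv
      have hSeq : PySem.List.sorted (PySem.Set.ofList (l.map pvkey)) (fun k => k) false = A₁ ++ A₂ := by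
        apply PySem.List.sorted_eq_of_perm_of_pairwise_lt _ _ _ hperm
        exact List.pairwise_append.mpr ⟨pw1, pw2, fun a ha b hb => lt_trans (h1 a ha) (h2 b hb)⟩
      have hblk0 : pvbl l (pvkey x) = [] := by
        apply List.filter_eq_nil_iff.mpr
        intro p hp hbeq
        have heq : pvkey p = pvkey x := by simpa using hbeq
        exact hk (heq ▸ List.mem_map_of_mem (f := pvkey) hp)
      unfold pvbuckets
      rw [hSeq, List.flatMap_append, hblk0, List.nil_append]
  -- apply the insertion lemmas
  have hfalse : ∀ a ∈ A₁.flatMap (pvbl l) ++ pvbl l (pvkey x),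
      (fun a b => decide (pvkey a < pvkey b)) x a = false := by
    intro a ha
    rcases List.mem_append.mp ha with ha | ha
    · obtain ⟨k, hk, hak⟩ := List.mem_flatMap.mp ha
      have := hmemb k a hak
      simp only [decide_eq_false_iff_not, not_lt, this]
      exact le_of_lt (h1 k hk)
    · have := hmemb (pvkey x) a ha
      simp [this]
  have htrue : ∀ a ∈ A₂.flatMap (pvbl l), (fun a b => decide (pvkey a < pvkey b)) x a = true := by
    intro a ha
    obtain ⟨k, hk, hak⟩ := List.mem_flatMap.mp ha
    have := hmemb k a hak
    simp only [decide_eq_true_eq, this]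
    exact h2 k hk
  rw [hSold, ← List.append_assoc, pv_insertBy_append _ _ _ _ hfalse,
    pv_insertBy_cons _ _ _ htrue]
  unfold pvbuckets
  rw [hsplit, List.flatMap_append, List.flatMap_cons, hA1, hA2, hbk0]
  simp [List.append_assoc]

-- B (the stable sort) computes the canonical bucket concatenation
theorem pv_B_eq_buckets (l : List String) : PySem.List.sorted l pvkey false = pvbuckets l := by
  induction l using List.reverseRecOn with
  | nil => rfl
  | append_singleton l x ih =>
    rw [PySem.List.sorted_eq_foldl_insertBy, List.foldl_append, List.foldl_cons, List.foldl_nil,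
      ← PySem.List.sorted_eq_foldl_insertBy, ih, pv_insert_buckets]

-- ===== VERDICT (by name: the statement is the Claim_ definition above) =====
theorem sort_by_hierarchy_spec : Claim_equal_sort_by_hierarchy := by
  intro l _
  unfold Spec_sort_by_hierarchy
  have hB : sort_by_hierarchy_alt l = PySem.List.sorted l pvkey false := rfl
  rw [pv_A_eq_buckets l, hB, pv_B_eq_buckets l]
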